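-- pv_equiv track=rewrite | github.com/ayoubzulfiqar/Leetcode-Medium | MinimumSplitIntoSubarraysWithGCDGreaterThanOne/minimum_split_into_subarrays_with_gcd_greater_than_one.py | minSplitIntoSubarraysWithGCDGreaterThanOne
-- ===== SOURCE A (Python) =====
-- import math
--
-- def minSplitIntoSubarraysWithGCDGreaterThanOne(nums: list[int]) -> int:
--     # If the array contains the number 1, it's impossible to satisfy the condition.
--     # Any subarray containing 1 will have a GCD of 1, which is not greater than 1.
--     # A subarray consisting solely of [1] also has a GCD of 1.
--     if 1 in nums:
--         return -1
--
--     n = len(nums)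
--     if n == 0:
--         return 0
--
--     # dp[i] stores the minimum number of subarrays required to partition the prefix nums[0...i-1].
--     # dp[0] is 0, as an empty prefix requires no subarrays.
--     dp = [float('inf')] * (n + 1)
--     dp[0] = 0
--
--     # Iterate through each possible end index `i` (from 1 to n) for the current prefix.
--     # `i` represents the length of the prefix `nums[0...i-1]`.
--     for i in range(1, n + 1):
--         # `current_gcd_val` will store the GCD of the subarray `nums[j...i-1]`.
--         current_gcd_val = 0
--
--         # Iterate backwards from `j = i-1` down to `0`.
--         # `j` represents the starting index of the last subarray `nums[j...i-1]`.
--         for j in range(i - 1, -1, -1):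
--             # If `j` is `i-1`, the subarray is just `[nums[i-1]]`.
--             # Otherwise, we extend the current subarray `nums[j+1...i-1]` by including `nums[j]`.
--             if j == i - 1:
--                 current_gcd_val = nums[i-1]
--             else:
--                 current_gcd_val = math.gcd(current_gcd_val, nums[j])
--
--             # If the GCD of the current subarray `nums[j...i-1]` is greater than 1,
--             # then this subarray is a valid candidate for the last split.
--             if current_gcd_val > 1:
--                 # If the prefix `nums[0...j-1]` was reachable (i.e., `dp[j]` is not infinity),
--                 # we can potentially form a valid partition ending at `i-1`.
--                 if dp[j] != float('inf'):
--                     # Update `dp[i]` with the minimum number of splits: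
--                     # `dp[j]` (minimum splits for `nums[0...j-1]`) + 1 (for the current valid subarray `nums[j...i-1]`).
--                     dp[i] = min(dp[i], dp[j] + 1)
--
--     # The final result is `dp[n]`, which represents the minimum splits for the entire array `nums[0...n-1]`.
--     # If `1` is not present in `nums`, a solution always exists (at worst, each element forms its own subarray).
--     return dp[n]
-- ===== SOURCE B (Python) =====
-- import math
--
-- def minSplitIntoSubarraysWithGCDGreaterThanOne(nums):
--     if not nums:
--         return 0
--     count = 0
--     g = 0  # gcd of the open segment (0 while the segment holds only zeros)
--     for x in nums:
--         t = math.gcd(g, x)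
--         if t == 1:
--             # x is coprime to the open segment: close it, start a new one at x
--             if g <= 1:
--                 return -1
--             count += 1
--             g = abs(x)
--             if g == 1:
--                 return -1
--         else:
--             g = t
--     return count + 1 if g > 1 else -1
-- ===== Notes on version B (the rewrite author's own statement) =====
-- stated objective: faster
-- what changed: Replaces the O(n^2) interval DP (for every prefix end, an inner backward scan over all segment starts with running gcd and a dp table) by a single greedy left-to-right pass that keeps one running gcd and closes a segment exactly when the next element is coprime to it; segment-extension can only shrink the gcd, so maximal greedy segments are optimal.
-- outside the precondition, e.g. on minSplitIntoSubarraysWithGCDGreaterThanOne([-4]): A returns inf, B returns 1; on minSplitIntoSubarraysWithGCDGreaterThanOne([0]): A returns inf, B returns -1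
import Mathlib
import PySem

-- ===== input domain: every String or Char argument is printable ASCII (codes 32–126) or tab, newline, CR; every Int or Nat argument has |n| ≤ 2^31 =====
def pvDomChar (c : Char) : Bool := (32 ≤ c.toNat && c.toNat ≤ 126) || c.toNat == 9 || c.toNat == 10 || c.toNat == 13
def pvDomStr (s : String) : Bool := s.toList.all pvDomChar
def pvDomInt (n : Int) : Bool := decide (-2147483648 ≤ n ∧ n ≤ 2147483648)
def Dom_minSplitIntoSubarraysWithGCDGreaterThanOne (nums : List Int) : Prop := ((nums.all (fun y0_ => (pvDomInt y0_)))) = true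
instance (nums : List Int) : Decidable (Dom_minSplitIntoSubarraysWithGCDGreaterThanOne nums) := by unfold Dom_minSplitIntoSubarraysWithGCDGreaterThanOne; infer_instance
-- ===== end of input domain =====

-- B replaces A's O(n^2) interval DP by a one-pass greedy that extends the current
-- subarray while its running gcd stays ≠ 1 (objective: faster, measured).

-- gcd of all elements of a list, as Python's math.gcd chain produces it (a non-negative value).
-- Proof-layer notion, also used by Pre_ below (the ports themselves use Int.gcd step by step).
def gA (s : List Int) : Nat := s.foldr (fun x g => Int.gcd x (g : Int)) 0

-- ===== PORT A =====
-- Python: dp value float('inf') is represented as `none`.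
def ominA (a b : Option Nat) : Option Nat :=
  match a, b with
  | none, b => b
  | some x, none => some x
  | some x, some y => some (min x y)

-- inner loop `for j in range(i-1, -1, -1)` of A: state = (current_gcd_val, dp_i so far).
-- `(List.range i).reverse` enumerates exactly the j's of range(i-1, -1, -1); list indexing
-- nums[j] / dp[j] is always in range in A, ported as getD.
def innerA (nums : List Int) (dp : List (Option Nat)) (i : Nat) : Option Nat :=
  ((List.range i).reverse.foldl
    (fun (st : Int × Option Nat) j =>
      let cur : Int := if j = i - 1 then nums.getD j 0 else (Int.gcd st.1 (nums.getD j 0) : Int)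
      let best : Option Nat :=
        if 1 < cur then
          match dp.getD j none with
          | some dj => ominA st.2 (some (dj + 1))
          | none => st.2
        else st.2
      (cur, best))
    ((0 : Int), (none : Option Nat))).2

-- outer loop `for i in range(1, n+1)`: dp list grows from [0] by one entry per i.
def dpA (nums : List Int) : Nat → List (Option Nat)
  | 0 => [some 0]
  | k + 1 => dpA nums k ++ [innerA nums (dpA nums k) (k + 1)]

def minSplitIntoSubarraysWithGCDGreaterThanOne (nums : List Int) : Int :=
  if (1 : Int) ∈ nums then -1
  else if nums.length = 0 then 0
  else
    match (dpA nums nums.length).getD nums.length none with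
    | some k => (k : Int)
    | none => 0  -- Python A returns float('inf') here, not an int; excluded by Pre_

-- ===== PORT B =====
-- greedy loop of Source B: state = (count, g); g = gcd of the open segment (0 while all zeros).
def goB : List Int → Int → Int → Int
  | [], count, g => if 1 < g then count + 1 else -1
  | x :: rest, count, g =>
    let t : Int := (Int.gcd g x : Int)
    if t = 1 then
      if g ≤ 1 then -1
      else if (x.natAbs : Int) = 1 then -1
      else goB rest (count + 1) (x.natAbs : Int)
    else goB rest count t

def minSplitIntoSubarraysWithGCDGreaterThanOne_alt (nums : List Int) : Int :=
  if nums = [] then 0 else goB nums 0 0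

-- ===== PRECONDITION & SPEC =====
-- per-subarray validity as A's dp checks it: for a one-element subarray A compares the RAW
-- element with 1 (`current_gcd_val = nums[i-1]`), otherwise the (non-negative) gcd chain.
def vAb (s : List Int) : Bool :=
  match s with
  | [x] => decide (1 < x)
  | _ => decide (1 < gA s)

-- `canSplitF f l`: some partition of l into vAb-subarrays exists (f = fuel ≥ length of l).
def canSplitF : Nat → List Int → Bool
  | 0, l => l.isEmpty
  | f + 1, l =>
    l.isEmpty || (List.range l.length).any (fun p => vAb (l.take (p + 1)) && canSplitF f (l.drop (p + 1)))

-- Pre_ excludes exactly the inputs on which Python A returns float('inf') — not an int —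
-- namely lists without 1 that admit no partition into subarrays A's dp accepts.
def Pre_minSplitIntoSubarraysWithGCDGreaterThanOne (nums : List Int) : Prop :=
  (1 : Int) ∈ nums ∨ canSplitF nums.length nums = true

instance (nums : List Int) : Decidable (Pre_minSplitIntoSubarraysWithGCDGreaterThanOne nums) := by
  unfold Pre_minSplitIntoSubarraysWithGCDGreaterThanOne; infer_instance

def pvWitness_minSplitIntoSubarraysWithGCDGreaterThanOne : List Int := [2, 6, 3]

def Spec_minSplitIntoSubarraysWithGCDGreaterThanOne (nums : List Int) (out : Int) : Prop := out = minSplitIntoSubarraysWithGCDGreaterThanOne_alt nums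
instance (nums : List Int) (out : Int) : Decidable (Spec_minSplitIntoSubarraysWithGCDGreaterThanOne nums out) := by unfold Spec_minSplitIntoSubarraysWithGCDGreaterThanOne; infer_instance

-- ===== CLAIM (what is proved, stated in full; the proofs are below) =====
def Claim_equal_minSplitIntoSubarraysWithGCDGreaterThanOne : Prop := ∀ (nums : List Int), Dom_minSplitIntoSubarraysWithGCDGreaterThanOne nums → Pre_minSplitIntoSubarraysWithGCDGreaterThanOne nums → Spec_minSplitIntoSubarraysWithGCDGreaterThanOne nums (minSplitIntoSubarraysWithGCDGreaterThanOne nums)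

-- ===== LEMMAS AND PROOFS =====

/- ---------- basic facts about gA (the gcd chain) ---------- -/

theorem gA_nil : gA [] = 0 := rfl

theorem gA_cons (x : Int) (s : List Int) : gA (x :: s) = Nat.gcd x.natAbs (gA s) := by
  simp [gA, Int.gcd]

theorem gA_singleton (x : Int) : gA [x] = x.natAbs := by
  simp [gA_cons, gA_nil]

theorem gA_append (u w : List Int) : gA (u ++ w) = Nat.gcd (gA u) (gA w) := by
  induction u with
  | nil => simp [gA_nil]
  | cons x u ih => simp [gA_cons, ih, Nat.gcd_assoc]

theorem gA_eq_zero_iff {s : List Int} : gA s = 0 ↔ ∀ x ∈ s, x = 0 := by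
  induction s with
  | nil => simp [gA_nil]
  | cons y s ih =>
    simp [gA_cons, Nat.gcd_eq_zero_iff, ih, Int.natAbs_eq_zero]

theorem gA_prefix_dvd (u w : List Int) : gA (u ++ w) ∣ gA u := by
  rw [gA_append]; exact Nat.gcd_dvd_left _ _

theorem gA_suffix_dvd (u w : List Int) : gA (u ++ w) ∣ gA w := by
  rw [gA_append]; exact Nat.gcd_dvd_right _ _

theorem gA_infix_dvd (u m w : List Int) : gA (u ++ m ++ w) ∣ gA m := by
  rw [List.append_assoc]
  exact (gA_suffix_dvd u (m ++ w)).trans (gA_prefix_dvd m w)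

/- ---------- validity of a subarray ---------- -/

-- B-side validity: positive gcd > 1 (what the greedy in Source B requires of each closed segment)
def vB (s : List Int) : Prop := 1 < gA s

-- A-side validity: what A's dp accepts (raw comparison for one-element subarrays)
def vA (s : List Int) : Prop := vAb s = true

theorem vA_single {x : Int} : vA [x] ↔ 1 < x := by simp [vA, vAb]

theorem vA_of_multi {x y : Int} {t : List Int} (h : 1 < gA (x :: y :: t)) : vA (x :: y :: t) := by
  simp [vA, vAb, h]

theorem vA_gA {s : List Int} (h : vA s) : vB s := by
  match s, h with
  | [], h => simp [vA, vAb, gA_nil] at h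
  | [x], h =>
      have hx : 1 < x := vA_single.1 h
      show 1 < gA [x]
      rw [gA_singleton]; omega
  | x :: y :: t, h => simpa [vA, vAb, vB] using h

theorem vB_ne_nil {s : List Int} (h : vB s) : s ≠ [] := by
  rintro rfl; simp [vB, gA_nil] at h

theorem vA_ne_nil {s : List Int} (h : vA s) : s ≠ [] := vB_ne_nil (vA_gA h)

-- a vB block that is not vA is a singleton [v] with v ≤ -2
theorem bad_shape {s : List Int} (hB : vB s) (hA : ¬ vA s) :
    ∃ v : Int, s = [v] ∧ v ≤ -2 := by
  match s with
  | [] => exact absurd rfl (vB_ne_nil hB)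
  | [x] =>
      refine ⟨x, rfl, ?_⟩
      have h1 : ¬ 1 < x := fun h => hA (vA_single.2 h)
      have h2 : 1 < x.natAbs := by simpa [vB, gA_singleton] using hB
      omega
  | x :: y :: t => exact absurd (vA_of_multi hB) hA

/- ---------- partitions ---------- -/

def PartOf (v : List Int → Prop) (ps : List (List Int)) (l : List Int) : Prop :=
  ps.flatten = l ∧ ∀ s ∈ ps, v s

def PA (l : List Int) (k : Nat) : Prop := ∃ ps, PartOf vA ps l ∧ ps.length = k

theorem PartOf_weaken {ps l} (h : PartOf vA ps l) : PartOf vB ps l :=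
  ⟨h.1, fun s hs => vA_gA (h.2 s hs)⟩

/- ---------- the abstract greedy and its relation to port B ---------- -/

def greedyP (cur : List Int) : List Int → Option (List (List Int))
  | [] => if 1 < gA cur then some [cur] else none
  | x :: xs =>
    if gA (cur ++ [x]) = 1 then
      (if 1 < gA cur then (greedyP [x] xs).map (cur :: ·) else none)
    else greedyP (cur ++ [x]) xs

theorem gA_push (cur : List Int) (x : Int) :
    gA (cur ++ [x]) = Nat.gcd (gA cur) x.natAbs := by
  rw [gA_append, gA_singleton]

theorem greedyP_gA_one {cur : List Int} (h : gA cur = 1) (xs : List Int) :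
    greedyP cur xs = none := by
  cases xs with
  | nil => simp [greedyP, h]
  | cons x xs => simp [greedyP, gA_push, h, Nat.gcd_one_left]

theorem goB_greedyP (xs : List Int) (count : Int) (cur : List Int) :
    goB xs count (gA cur : Int) =
      (match greedyP cur xs with
       | some ps => count + ps.length
       | none => -1) := by
  induction xs generalizing count cur with
  | nil =>
    by_cases h : 1 < gA cur
    · simp [goB, greedyP, h, show (1 : Int) < (gA cur : Int) by exact_mod_cast h]
    · have h' : ¬ (1 : Int) < (gA cur : Int) := by exact_mod_cast h
      simp [goB, greedyP, h, h']
  | cons x xs ih =>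
    have hgcd : Int.gcd (gA cur : Int) x = gA (cur ++ [x]) := by
      rw [gA_push]; simp [Int.gcd]
    by_cases h1 : gA (cur ++ [x]) = 1
    · have ht : ((Int.gcd (gA cur : Int) x : Nat) : Int) = 1 := by rw [hgcd, h1]; rfl
      by_cases h2 : 1 < gA cur
      · have h2' : ¬ ((gA cur : Int) ≤ 1) := by exact_mod_cast Nat.not_le.2 h2
        by_cases h3 : x.natAbs = 1
        · have : greedyP [x] xs = none := greedyP_gA_one (by rw [gA_singleton, h3]) xs
          simp [goB, greedyP, ht, h1, h2, h2', h3, this]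
        · have h3' : ¬ ((x.natAbs : Int) = 1) := by exact_mod_cast h3
          have := ih (count + 1) [x]
          rw [gA_singleton] at this
          simp only [goB, ht, if_neg h2', if_neg h3', this,
            greedyP, if_pos h1, if_pos h2]
          cases hps : greedyP [x] xs with
          | none => simp
          | some ps => simp; ring
      · have h2' : (gA cur : Int) ≤ 1 := by exact_mod_cast Nat.not_lt.1 h2
        simp [goB, greedyP, ht, h1, h2, h2']
    · have ht : ¬ (((Int.gcd (gA cur : Int) x : Nat) : Int) = 1) := by
        rw [hgcd]; exact_mod_cast h1
      have := ih count (cur ++ [x])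
      simp only [goB, if_neg ht, greedyP, if_neg h1]
      rw [← hgcd] at this
      exact this

theorem greedyP_sound (xs : List Int) :
    ∀ cur ps, greedyP cur xs = some ps → ps.flatten = cur ++ xs ∧ ∀ s ∈ ps, vB s := by
  induction xs with
  | nil =>
    intro cur ps h
    by_cases h2 : 1 < gA cur
    · simp [greedyP, h2] at h
      subst h
      exact ⟨by simp, by simpa [vB] using h2⟩
    · simp [greedyP, h2] at h
  | cons x xs ih =>
    intro cur ps h
    by_cases h1 : gA (cur ++ [x]) = 1
    · by_cases h2 : 1 < gA cur
      · simp only [greedyP, if_pos h1, if_pos h2, Option.map_eq_some_iff] at h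
        rcases h with ⟨ps', hps', rfl⟩
        rcases ih [x] ps' hps' with ⟨hf, hv⟩
        refine ⟨by simp [hf], ?_⟩
        intro s hs
        rcases List.mem_cons.1 hs with rfl | hs
        · exact h2
        · exact hv s hs
      · simp [greedyP, h1, h2] at h
    · simp only [greedyP, if_neg h1] at h
      rcases ih (cur ++ [x]) ps h with ⟨hf, hv⟩
      exact ⟨by simpa using hf, hv⟩

theorem flatten_nil_of_vB {rs : List (List Int)} (hf : rs.flatten = [])
    (hv : ∀ s ∈ rs, vB s) : rs = [] := by
  cases rs with
  | nil => rfl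
  | cons s rs =>
    exfalso
    simp only [List.flatten_cons] at hf
    have : s = [] := (List.append_eq_nil_iff.1 hf).1
    exact vB_ne_nil (hv s (List.mem_cons_self)) this

theorem greedy_min (xs : List Int) :
    ∀ cur r1 rs', PartOf vB (r1 :: rs') (cur ++ xs) →
    (∃ ext, r1 = cur ++ ext) →
    ∃ ps, greedyP cur xs = some ps ∧ ps.length ≤ (r1 :: rs').length := by
  induction xs with
  | nil =>
    intro cur r1 rs' hpart hext
    rcases hext with ⟨ext, rfl⟩
    have hf : (cur ++ ext) ++ rs'.flatten = cur ++ [] := by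
      simpa using hpart.1
    rw [List.append_assoc, List.append_right_inj] at hf
    rcases List.append_eq_nil_iff.1 hf with ⟨rfl, hfr⟩
    have : rs' = [] := flatten_nil_of_vB hfr (fun s hs => hpart.2 s (List.mem_cons_of_mem _ hs))
    subst this
    have hv : vB (cur ++ []) := hpart.2 _ (List.mem_cons_self)
    rw [List.append_nil] at hv
    have hv' : 1 < gA cur := hv
    exact ⟨[cur], by simp [greedyP, hv'], by simp⟩
  | cons x xs ih =>
    intro cur r1 rs' hpart hext
    rcases hext with ⟨ext, rfl⟩
    have hflat : ext ++ rs'.flatten = x :: xs := by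
      have := hpart.1
      simp only [List.flatten_cons, List.append_assoc, List.append_right_inj] at this
      simpa using this
    by_cases h1 : gA (cur ++ [x]) = 1
    · -- greedy closes the block here
      cases ext with
      | cons e ext₂ =>
        exfalso
        have he : e = x := by
          have := hflat; simp at this; exact this.1
        subst he
        have hv : vB (cur ++ e :: ext₂) := hpart.2 _ (List.mem_cons_self)
        have hdvd : gA (cur ++ e :: ext₂) ∣ gA (cur ++ [e]) := by
          have : cur ++ e :: ext₂ = (cur ++ [e]) ++ ext₂ := by simp
          rw [this]; exact gA_prefix_dvd _ _
        rw [h1] at hdvd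
        have h2 := Nat.le_of_dvd Nat.one_pos hdvd
        have h3 : 1 < gA (cur ++ e :: ext₂) := hv
        omega
      | nil =>
        simp only [List.append_nil] at hpart ⊢
        simp only [List.nil_append] at hflat
        have hv : vB cur := hpart.2 _ (List.mem_cons_self)
        cases rs' with
        | nil => simp at hflat
        | cons r₂ rs'' =>
          have hr₂ : ∃ r₂', r₂ = x :: r₂' := by
            have hne : r₂ ≠ [] := vB_ne_nil (hpart.2 _ (by simp))
            cases r₂ with
            | nil => exact absurd rfl hne
            | cons e r₂' =>
              have : e = x := by have := hflat; simp at this; exact this.1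
              exact ⟨r₂', by rw [this]⟩
          rcases hr₂ with ⟨r₂', rfl⟩
          have hxs : r₂' ++ rs''.flatten = xs := by
            have := hflat; simpa using this
          rcases ih [x] (x :: r₂') rs''
            ⟨by simpa using hxs, fun s hs => hpart.2 s (List.mem_cons_of_mem _ hs)⟩
            ⟨r₂', by simp⟩ with ⟨ps, hg, hlen⟩
          refine ⟨cur :: ps, ?_, ?_⟩
          · have hv' : 1 < gA cur := hv
            simp [greedyP, h1, hv', hg]
          · simpa using Nat.succ_le_succ hlen
    · -- greedy extends the block
      cases ext with
      | cons e ext₂ =>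
        have he : e = x := by have := hflat; simp at this; exact this.1
        subst he
        rcases ih (cur ++ [e]) (cur ++ e :: ext₂) rs'
          ⟨by simpa using hpart.1, hpart.2⟩
          ⟨ext₂, by simp⟩ with ⟨ps, hg, hlen⟩
        exact ⟨ps, by simpa [greedyP, h1] using hg, hlen⟩
      | nil =>
        simp only [List.append_nil] at hpart
        simp only [List.nil_append] at hflat
        have hv : vB cur := hpart.2 _ (List.mem_cons_self)
        cases rs' with
        | nil => simp at hflat
        | cons r₂ rs'' =>
          have hne : r₂ ≠ [] := vB_ne_nil (hpart.2 _ (by simp))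
          rcases (by cases r₂ with
            | nil => exact absurd rfl hne
            | cons e r₂' =>
              have : e = x := by have := hflat; simp at this; exact this.1
              exact ⟨r₂', by rw [this]⟩ : ∃ r₂', r₂ = x :: r₂') with ⟨r₂', rfl⟩
          have hxs : r₂' ++ rs''.flatten = xs := by
            have := hflat; simpa using this
          have hv1 : 1 < gA (cur ++ [x]) := by
            have h0 : gA (cur ++ [x]) ≠ 0 := by
              rw [gA_push]
              intro h
              rcases Nat.gcd_eq_zero_iff.1 h with ⟨hc, -⟩
              have hv' : 1 < gA cur := hv
              omega
            omega
          have hvr₂ : 1 < gA (x :: r₂') := (hpart.2 _ (by simp))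
          by_cases hz : gA r₂' = 0
          · -- tail of the straddling block is all zeros: absorb it into the open block
            have hblocks : ∀ s ∈ ((cur ++ [x]) ++ r₂') :: rs'', vB s := by
              intro s hs
              rcases List.mem_cons.1 hs with rfl | hs
              · show 1 < gA ((cur ++ [x]) ++ r₂')
                rw [gA_append, hz, Nat.gcd_zero_right]
                exact hv1
              · exact hpart.2 s (by simp [hs])
            rcases ih (cur ++ [x]) ((cur ++ [x]) ++ r₂') rs''
              ⟨by simp [← hxs], hblocks⟩ ⟨r₂', rfl⟩ with ⟨ps, hg, hlen⟩
            exact ⟨ps, by simpa [greedyP, h1] using hg, by simpa using Nat.le_succ_of_le hlen⟩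
          · -- tail of the straddling block is its own valid block
            have hvr₂' : 1 < gA r₂' := by
              have hdvd : gA (x :: r₂') ∣ gA r₂' := by
                have : x :: r₂' = [x] ++ r₂' := by simp
                rw [this]; exact gA_suffix_dvd _ _
              rcases Nat.eq_zero_or_pos (gA r₂') with h | h
              · exact absurd h hz
              · have := Nat.le_of_dvd h hdvd; omega
            have hblocks : ∀ s ∈ (cur ++ [x]) :: r₂' :: rs'', vB s := by
              intro s hs
              rcases List.mem_cons.1 hs with rfl | hs
              · exact hv1
              · rcases List.mem_cons.1 hs with rfl | hs
                · exact hvr₂'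
                · exact hpart.2 s (by simp [hs])
            rcases ih (cur ++ [x]) (cur ++ [x]) (r₂' :: rs'')
              ⟨by simp [← hxs], hblocks⟩ ⟨[], by simp⟩ with ⟨ps, hg, hlen⟩
            exact ⟨ps, by simpa [greedyP, h1] using hg, by simpa using hlen⟩


/- ---------- A side: characterizing the dp ---------- -/

def sliceN (nums : List Int) (j i : Nat) : List Int := (nums.drop j).take (i - j)

def candA (nums : List Int) (dp : List (Option Nat)) (i j : Nat) : Option Nat :=
  if vAb (sliceN nums j i) then (dp.getD j none).map (· + 1) else none

-- value of the inner-loop accumulator after processing the first c values of j (j = i-1 down to i-c)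
def bestD (nums : List Int) (dp : List (Option Nat)) (i : Nat) : Nat → Option Nat
  | 0 => none
  | c + 1 => ominA (bestD nums dp i c) (candA nums dp i (i - (c + 1)))

theorem sliceN_length {nums : List Int} {j i : Nat} (h : i ≤ nums.length) :
    (sliceN nums j i).length = i - j := by
  simp [sliceN]; omega

theorem sliceN_cons {nums : List Int} {j i : Nat} (hj : j < i) (hn : j < nums.length) :
    sliceN nums j i = nums.getD j 0 :: sliceN nums (j + 1) i := by
  unfold sliceN
  rw [List.getD_eq_getElem _ _ hn]
  rw [show i - j = (i - (j+1)) + 1 by omega]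
  rw [show nums.drop j = nums[j] :: nums.drop (j + 1) from (List.drop_eq_getElem_cons hn)]
  rw [List.take_succ_cons]

theorem sliceN_singleton {nums : List Int} {j : Nat} (hn : j < nums.length) :
    sliceN nums j (j + 1) = [nums.getD j 0] := by
  rw [sliceN_cons (by omega) hn]
  simp [sliceN]

theorem take_slice {nums : List Int} {j i : Nat} (hji : j ≤ i) :
    nums.take i = nums.take j ++ sliceN nums j i := by
  unfold sliceN
  rw [show i = j + (i - j) by omega, List.take_add]
  congr 2
  omega

theorem vAb_multi {s : List Int} (h : 2 ≤ s.length) : vAb s = decide (1 < gA s) := by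
  match s, h with
  | x :: y :: t, _ => rfl

theorem ominA_eq_some {a b : Option Nat} {m : Nat} (h : ominA a b = some m) :
    a = some m ∨ b = some m := by
  match a, b with
  | none, b => right; exact h
  | some x, none => left; exact h
  | some x, some y =>
    simp [ominA] at h
    rcases Nat.le_total x y with hxy | hxy
    · left; simp [ominA, Nat.min_eq_left hxy] at h; simp [h]
    · right; simp [ominA, Nat.min_eq_right hxy] at h; simp [h]

theorem ominA_le_right {b : Option Nat} {m : Nat} :
    ∃ m' ≤ m, ominA b (some m) = some m' := by
  match b with
  | none => exact ⟨m, le_rfl, rfl⟩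
  | some x => exact ⟨min x m, Nat.min_le_right _ _, rfl⟩

theorem ominA_le_left {a : Option Nat} {m : Nat} (c : Option Nat) (h : a = some m) :
    ∃ m' ≤ m, ominA a c = some m' := by
  subst h
  match c with
  | none => exact ⟨m, le_rfl, rfl⟩
  | some y => exact ⟨min m y, Nat.min_le_left _ _, rfl⟩

theorem bestD_sound {nums dp i} : ∀ c (hc : c ≤ i) m,
    bestD nums dp i c = some m → ∃ j, i - c ≤ j ∧ j < i ∧ candA nums dp i j = some m := by
  intro c
  induction c with
  | zero => intro _ m h; simp [bestD] at h
  | succ c ih =>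
    intro hc m h
    rcases ominA_eq_some h with h' | h'
    · rcases ih (by omega) m h' with ⟨j, h1, h2, h3⟩
      exact ⟨j, by omega, h2, h3⟩
    · exact ⟨i - (c + 1), le_rfl, by omega, h'⟩

theorem bestD_min {nums dp i} : ∀ c (hc : c ≤ i) j, i - c ≤ j → j < i → ∀ m,
    candA nums dp i j = some m → ∃ m' ≤ m, bestD nums dp i c = some m' := by
  intro c
  induction c with
  | zero => intro hc j h1 h2; omega
  | succ c ih =>
    intro hc j h1 h2 m hm
    by_cases hj : j = i - (c + 1)
    · subst hj
      rw [show bestD nums dp i (c+1) = ominA (bestD nums dp i c) (candA nums dp i (i - (c+1))) from rfl, hm]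
      exact ominA_le_right
    · rcases ih (by omega) j (by omega) h2 m hm with ⟨m', hle, hb⟩
      rcases ominA_le_left (candA nums dp i (i - (c + 1))) hb with ⟨m'', hle', hb'⟩
      exact ⟨m'', le_trans hle' hle, hb'⟩

-- the inner loop computes bestD i
-- the running value `current_gcd_val` after the inner loop has handled index j (j < i)
def curA (nums : List Int) (i j : Nat) : Int :=
  if j = i - 1 then nums.getD j 0 else (gA (sliceN nums j i) : Int)

-- the inner-loop body, as a named function
def stepF (nums : List Int) (dp : List (Option Nat)) (i : Nat)
    (st : Int × Option Nat) (j : Nat) : Int × Option Nat :=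
  let cur : Int := if j = i - 1 then nums.getD j 0 else (Int.gcd st.1 (nums.getD j 0) : Int)
  let best : Option Nat :=
    if 1 < cur then
      match dp.getD j none with
      | some dj => ominA st.2 (some (dj + 1))
      | none => st.2
    else st.2
  (cur, best)

theorem innerA_eq_foldl_stepF (nums : List Int) (dp : List (Option Nat)) (i : Nat) :
    innerA nums dp i
      = ((List.range i).reverse.foldl (stepF nums dp i) ((0 : Int), (none : Option Nat))).2 := rfl

theorem curA_valid {nums : List Int} {i j : Nat}
    (hj : j < i) (hn : i ≤ nums.length) :
    (1 < curA nums i j) ↔ vAb (sliceN nums j i) = true := by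
  have hjn : j < nums.length := by omega
  by_cases hj1 : j = i - 1
  · have hsl : sliceN nums j i = [nums.getD j 0] := by
      rw [show i = j + 1 by omega]; exact sliceN_singleton hjn
    rw [show vAb (sliceN nums j i) = decide (1 < nums.getD j 0) by rw [hsl]; rfl]
    simp [curA, hj1]
  · have hlen : 2 ≤ (sliceN nums j i).length := by rw [sliceN_length hn]; omega
    rw [vAb_multi hlen]
    simp only [curA, if_neg hj1]
    constructor
    · intro h; simp; exact_mod_cast h
    · intro h; simp at h; exact_mod_cast h

theorem bestD_step {nums : List Int} {dp : List (Option Nat)} {i j : Nat}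
    (hj : j < i) (hn : i ≤ nums.length) (b : Option Nat) :
    (if 1 < curA nums i j then
      (match dp.getD j none with
       | some dj => ominA b (some (dj + 1))
       | none => b)
      else b) = ominA b (candA nums dp i j) := by
  unfold candA
  by_cases hv : vAb (sliceN nums j i) = true
  · rw [if_pos hv, if_pos ((curA_valid hj hn).2 hv)]
    cases hdp : dp.getD j none with
    | none => cases b <;> simp [ominA]
    | some dj => simp
  · rw [if_neg hv, if_neg (fun h => hv ((curA_valid hj hn).1 h))]
    cases b <;> simp [ominA]

theorem stepF_mid {nums : List Int} {dp : List (Option Nat)} {i j : Nat}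
    (hj : j + 1 < i) (hn : i ≤ nums.length) :
    stepF nums dp i (curA nums i (j + 1), bestD nums dp i (i - (j + 1))) j
      = (curA nums i j, bestD nums dp i (i - j)) := by
  have hjn : j < nums.length := by omega
  have hj1 : ¬ j = i - 1 := by omega
  have hcur : (Int.gcd (curA nums i (j + 1)) (nums.getD j 0) : Int) = curA nums i j := by
    by_cases hj2 : j + 1 = i - 1
    · have hslice : sliceN nums j i = [nums.getD j 0, nums.getD (j+1) 0] := by
        rw [sliceN_cons (by omega) hjn,
          show i = (j + 1) + 1 by omega, sliceN_singleton (by omega)]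
      simp only [curA, if_pos hj2, if_neg hj1, hslice, gA_cons, gA_singleton, gA_nil]
      simp [Int.gcd, Nat.gcd_comm]
    · have hslice : sliceN nums j i = nums.getD j 0 :: sliceN nums (j+1) i :=
        sliceN_cons (by omega) hjn
      simp only [curA, if_neg hj2, if_neg hj1, hslice, gA_cons]
      simp [Int.gcd, Nat.gcd_comm]
  unfold stepF
  simp only [if_neg hj1]
  rw [hcur]
  refine congrArg (Prod.mk _) ?_
  rw [show i - j = (i - (j + 1)) + 1 by omega]
  rw [show bestD nums dp i ((i - (j+1)) + 1)
      = ominA (bestD nums dp i (i - (j+1))) (candA nums dp i (i - (i - (j+1) + 1))) from rfl]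
  rw [show i - (i - (j + 1) + 1) = j by omega]
  exact bestD_step (by omega) hn _

theorem stepF_first {nums : List Int} {dp : List (Option Nat)} {i : Nat}
    (hn : i + 1 ≤ nums.length) :
    stepF nums dp (i + 1) ((0 : Int), (none : Option Nat)) i
      = (curA nums (i + 1) i, bestD nums dp (i + 1) 1) := by
  have hieq : i = (i + 1) - 1 := rfl
  unfold stepF
  simp only [if_pos hieq]
  refine congrArg₂ Prod.mk (by simp [curA]) ?_
  rw [show bestD nums dp (i+1) 1
      = ominA (bestD nums dp (i+1) 0) (candA nums dp (i+1) ((i+1) - 1)) from rfl]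
  rw [show bestD nums dp (i+1) 0 = none from rfl]
  have := bestD_step (nums := nums) (dp := dp) (show i < i + 1 by omega) hn none
  rw [show curA nums (i+1) i = nums.getD i 0 by simp [curA]] at this
  rw [show (i + 1) - 1 = i from rfl]
  exact this

theorem foldl_range_rev_succ {σ : Type} (f : σ → Nat → σ) (init : σ) (j : Nat) :
    (List.range (j+1)).reverse.foldl f init = (List.range j).reverse.foldl f (f init j) := by
  rw [List.range_succ]
  simp

theorem innerA_eq_bestD {nums : List Int} {dp : List (Option Nat)} {i : Nat}
    (hi : 1 ≤ i) (hn : i ≤ nums.length) :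
    innerA nums dp i = bestD nums dp i i := by
  obtain ⟨i', rfl⟩ : ∃ i', i = i' + 1 := ⟨i - 1, by omega⟩
  have main : ∀ j, j < i' + 1 →
      (List.range j).reverse.foldl (stepF nums dp (i' + 1))
        (curA nums (i' + 1) j, bestD nums dp (i' + 1) ((i' + 1) - j))
      = (curA nums (i' + 1) 0, bestD nums dp (i' + 1) (i' + 1)) := by
    intro j
    induction j with
    | zero => intro _; simp
    | succ j ih =>
      intro hji
      rw [foldl_range_rev_succ, stepF_mid hji hn]
      exact ih (by omega)
  rw [innerA_eq_foldl_stepF, foldl_range_rev_succ, stepF_first hn]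
  rw [show bestD nums dp (i'+1) 1 = bestD nums dp (i'+1) ((i'+1) - i') by
    rw [show (i'+1) - i' = 1 by omega]]
  rw [main i' (by omega)]

def entryA (nums : List Int) (i : Nat) : Option Nat := (dpA nums i).getD i none

theorem dpA_length (nums : List Int) (k : Nat) : (dpA nums k).length = k + 1 := by
  induction k with
  | zero => rfl
  | succ k ih => simp [dpA, ih]

theorem dpA_prefix (nums : List Int) : ∀ k j, j ≤ k →
    (dpA nums k).getD j none = entryA nums j := by
  intro k
  induction k with
  | zero => intro j hj; interval_cases j; rfl
  | succ k ih =>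
    intro j hj
    rcases Nat.lt_or_ge j (k + 1) with h | h
    · rw [show dpA nums (k+1) = dpA nums k ++ [innerA nums (dpA nums k) (k+1)] from rfl]
      rw [List.getD_append _ _ none j (by rw [dpA_length]; omega)]
      exact ih j (by omega)
    · have hj' : j = k + 1 := by omega
      subst hj'
      rfl

theorem entryA_succ (nums : List Int) (k : Nat) :
    entryA nums (k + 1) = innerA nums (dpA nums k) (k + 1) := by
  unfold entryA
  rw [show dpA nums (k+1) = dpA nums k ++ [innerA nums (dpA nums k) (k+1)] from rfl]
  rw [List.getD_append_right _ _ _ (k + 1) (by rw [dpA_length])]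
  simp [dpA_length]

theorem entry_spec (nums : List Int) : ∀ i, i ≤ nums.length →
    (∀ m, entryA nums i = some m → PA (nums.take i) m) ∧
    (∀ k, PA (nums.take i) k → ∃ m ≤ k, entryA nums i = some m) := by
  intro i
  induction i using Nat.strong_induction_on with
  | _ i ih =>
    intro hn
    match i with
    | 0 =>
      constructor
      · intro m hm
        have hm0 : m = 0 := by
          have : entryA nums 0 = some 0 := rfl
          rw [this] at hm
          exact (Option.some_inj.1 hm).symm
        subst hm0
        exact ⟨[], ⟨rfl, by simp⟩, rfl⟩
      · intro k _
        exact ⟨0, Nat.zero_le _, rfl⟩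
    | i + 1 =>
      have hentry : entryA nums (i+1) = bestD nums (dpA nums i) (i+1) (i+1) := by
        rw [entryA_succ, innerA_eq_bestD (by omega) hn]
      constructor
      · intro m hm
        rw [hentry] at hm
        rcases bestD_sound (i+1) le_rfl m hm with ⟨j, _, hj2, hc⟩
        unfold candA at hc
        by_cases hv : vAb (sliceN nums j (i+1)) = true
        · rw [if_pos hv] at hc
          cases hdp : (dpA nums i).getD j none with
          | none => rw [hdp] at hc; simp at hc
          | some dj =>
            rw [hdp] at hc
            simp at hc
            have hde : entryA nums j = some dj := by
              rw [← dpA_prefix nums i j (by omega)]; exact hdp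
            rcases (ih j (by omega) (by omega)).1 dj hde with ⟨ps, ⟨hf, hvs⟩, hlen⟩
            refine ⟨ps ++ [sliceN nums j (i+1)], ⟨?_, ?_⟩, ?_⟩
            · rw [List.flatten_append, hf]
              simp [← take_slice (by omega : j ≤ i + 1)]
            · intro s hs
              rcases List.mem_append.1 hs with hs | hs
              · exact hvs s hs
              · rw [List.mem_singleton.1 hs]; exact hv
            · simp [hlen, ← hc]
        · rw [if_neg hv] at hc; simp at hc
      · intro k hk
        rcases hk with ⟨ps, ⟨hf, hvs⟩, hlen⟩
        rcases List.eq_nil_or_concat ps with rfl | ⟨ps', s, rfl⟩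
        · exfalso
          have h0 : ([] : List (List Int)).flatten.length = (nums.take (i+1)).length :=
            congrArg List.length hf
          simp only [List.flatten_nil, List.length_nil, List.length_take] at h0
          omega
        · rw [List.concat_eq_append] at hf hvs hlen
          rw [List.flatten_append] at hf
          simp only [List.flatten_cons, List.flatten_nil, List.append_nil] at hf
          have hs : vA s := hvs s (by simp)
          have hsne : s ≠ [] := vA_ne_nil hs
          have hslen : 1 ≤ s.length := List.length_pos_iff.2 hsne
          have hlens : (ps'.flatten).length + s.length = i + 1 := by
            have := congrArg List.length hf
            simpa [List.length_take, Nat.min_eq_left hn] using this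
          have hstake : s.length ≤ i + 1 := by omega
          set j := i + 1 - s.length with hjdef
          have hj1 : j < i + 1 := by omega
          have hts := take_slice (nums := nums) (show j ≤ i + 1 by omega)
          rw [hts] at hf
          have hlenslice : s.length = (sliceN nums j (i+1)).length := by
            rw [sliceN_length hn]; omega
          obtain ⟨hfl, hsl⟩ := List.append_inj' hf hlenslice
          have hPA' : PA (nums.take j) (ps'.length) := ⟨ps', ⟨hfl, fun t ht => hvs t (by simp [ht])⟩, rfl⟩
          rcases (ih j (by omega) (by omega)).2 ps'.length hPA' with ⟨m', hm'le, hm'⟩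
          have hcand : candA nums (dpA nums i) (i+1) j = some (m' + 1) := by
            unfold candA
            rw [if_pos (by rw [← hsl]; exact hs)]
            rw [dpA_prefix nums i j (by omega), hm']
            rfl
          rcases bestD_min (i+1) le_rfl j (by omega) hj1 (m'+1) hcand with ⟨m, hmle, hm⟩
          refine ⟨m, ?_, by rw [hentry]; exact hm⟩
          have : ps'.length + 1 = k := by simpa using hlen
          omega

/- ---------- the exchange argument: a minimum-μ vB-partition has only vA blocks ----------
   qs is a fixed vA-partition (it exists on Pre_); linkedB qs i says positions i and i+1
   lie in the same block of qs. -/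

def linkedB : List (List Int) → Nat → Bool
  | [], _ => false
  | C :: qs', i => if i + 2 ≤ C.length then true else if C.length ≤ i then linkedB qs' (i - C.length) else false

theorem linked_lt {qs : List (List Int)} : ∀ {i : Nat}, linkedB qs i = true → i + 1 < qs.flatten.length := by
  induction qs with
  | nil => intro i h; simp [linkedB] at h
  | cons C qs' ih =>
    intro i h
    unfold linkedB at h
    split at h
    · rename_i hle
      simp only [List.flatten_cons, List.length_append]
      omega
    · split at h
      · rename_i h2
        have := ih h
        simp only [List.flatten_cons, List.length_append]
        omega
      · exact absurd h (by simp)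

-- (Q1): an element ≤ 1 cannot be its own block, so it is linked to a neighbour
theorem linked_of_le_one : ∀ (qs : List (List Int)) (l : List Int), PartOf vA qs l →
    ∀ i, i < l.length → l.getD i 0 ≤ 1 →
    (linkedB qs i = true ∨ (0 < i ∧ linkedB qs (i - 1) = true)) := by
  intro qs
  induction qs with
  | nil =>
    intro l hp i hi _
    rw [← hp.1] at hi
    simp at hi
  | cons C qs' ih =>
    intro l hp i hi hle
    have hl : l = C ++ qs'.flatten := by rw [← hp.1]; simp
    have hC : vA C := hp.2 C (by simp)
    have hCne : C ≠ [] := vA_ne_nil hC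
    have hClen : 1 ≤ C.length := List.length_pos_iff.2 hCne
    rcases Nat.lt_or_ge i C.length with hiC | hiC
    · -- i inside the first block
      match C, hC, hiC with
      | [x], hC, hiC =>
        exfalso
        have hx : 1 < x := vA_single.1 hC
        have hi0 : i = 0 := by
          have : i < 1 := by simpa using hiC
          omega
        subst hi0
        rw [hl] at hle
        rw [List.getD_append _ _ _ _ (by simp)] at hle
        simp at hle
        omega
      | x :: y :: t, hC, hiC =>
        by_cases h2 : i + 2 ≤ (x :: y :: t).length
        · left
          unfold linkedB
          rw [if_pos h2]
        · right
          have hlt2 : (x :: y :: t).length = t.length + 2 := by simp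
          have hi1 : i = t.length + 1 := by
            have := hiC
            simp at this
            omega
          refine ⟨by omega, ?_⟩
          unfold linkedB
          rw [if_pos (by omega)]
    · -- i in the rest
      have hlen : l.length = C.length + qs'.flatten.length := by rw [hl]; simp
      have hrec := ih qs'.flatten ⟨rfl, fun s hs => hp.2 s (by simp [hs])⟩ (i - C.length)
        (by omega) (by
          rw [hl] at hle
          rwa [List.getD_append_right _ _ _ _ hiC] at hle)
      rcases hrec with h | ⟨h0, h⟩
      · left
        unfold linkedB
        rw [if_neg (by omega), if_pos hiC]
        exact h
      · right
        refine ⟨by omega, ?_⟩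
        unfold linkedB
        rw [if_neg (by omega), if_pos (by omega)]
        rw [show i - 1 - C.length = i - C.length - 1 by omega]
        exact h

-- (Q2): a run of linked positions lies inside one block of qs, whose gcd divides the slice gcd
theorem run_in_block : ∀ (qs : List (List Int)) (l : List Int), PartOf vA qs l →
    ∀ a m, (∀ j, a ≤ j → j < a + m → linkedB qs j = true) → a + m < l.length →
    (∃ x ∈ (l.drop a).take (m + 1), x ≠ 0) → 1 < gA ((l.drop a).take (m + 1)) := by
  intro qs
  induction qs with
  | nil =>
    intro l hp a m _ hlt _
    rw [← hp.1] at hlt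
    simp at hlt
  | cons C qs' ih =>
    intro l hp a m hrun hlt hnz
    have hl : l = C ++ qs'.flatten := by rw [← hp.1]; simp
    have hC : vA C := hp.2 C (by simp)
    have hCne : C ≠ [] := vA_ne_nil hC
    have hClen : 1 ≤ C.length := List.length_pos_iff.2 hCne
    rcases Nat.lt_or_ge (a + m) C.length with hin | hout
    · -- slice inside C
      have hslice : (l.drop a).take (m+1) = (C.drop a).take (m+1) := by
        rw [hl, List.drop_append_of_le_length (by omega), List.take_append_of_le_length]
        rw [List.length_drop]
        omega
      rw [hslice] at hnz ⊢
      have hdecomp : C = C.take a ++ ((C.drop a).take (m+1) ++ (C.drop a).drop (m+1)) := by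
        rw [List.take_append_drop, List.take_append_drop]
      have hdvd : gA C ∣ gA ((C.drop a).take (m+1)) := by
        calc gA C = gA (C.take a ++ (C.drop a).take (m+1) ++ (C.drop a).drop (m+1)) := by
              rw [List.append_assoc, ← hdecomp]
          _ ∣ _ := gA_infix_dvd _ _ _
      have h2 : 1 < gA C := vA_gA hC
      have h0 : gA ((C.drop a).take (m+1)) ≠ 0 := by
        rw [Ne, gA_eq_zero_iff]
        rcases hnz with ⟨x, hx, hxne⟩
        exact fun h => hxne (h x hx)
      have := Nat.le_of_dvd (Nat.pos_of_ne_zero h0) hdvd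
      omega
    · rcases Nat.lt_or_ge a C.length with hstrad | hrest
      · -- run crosses the boundary of C: impossible since position C.length-1 is linked
        exfalso
        have hj := hrun (C.length - 1) (by omega) (by omega)
        unfold linkedB at hj
        rw [if_neg (by omega), if_neg (by omega)] at hj
        simp at hj
      · -- slice inside the rest
        have hslice : (l.drop a) = qs'.flatten.drop (a - C.length) := by
          rw [hl, show a = C.length + (a - C.length) by omega, List.drop_append]
          rw [List.drop_eq_nil_of_le (by omega)]
          rw [show C.length + (a - C.length) - C.length = a - C.length by omega]
          simp
        have hlen : l.length = C.length + qs'.flatten.length := by rw [hl]; simp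
        have := ih qs'.flatten ⟨rfl, fun s hs => hp.2 s (by simp [hs])⟩ (a - C.length) m
          (by
            intro j hj1 hj2
            have := hrun (j + C.length) (by omega) (by omega)
            unfold linkedB at this
            rw [if_neg (by omega), if_pos (by omega)] at this
            rwa [show j + C.length - C.length = j by omega] at this)
          (by omega)
          (by rw [← hslice]; exact hnz)
        rw [← hslice] at this
        exact this

/- ---------- the potential μ = (count, #non-vA blocks, weighted positions), lexicographically ---------- -/

def phiQ (qs : List (List Int)) (n i : Nat) : Nat :=
  if 0 < i ∧ linkedB qs (i - 1) = true then i else n - i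

def sumPhi (qs : List (List Int)) (n : Nat) : Nat → List (List Int) → Nat
  | _, [] => 0
  | off, s :: ps => (if vAb s then 0 else phiQ qs n off) + sumPhi qs n (off + s.length) ps

def badC (ps : List (List Int)) : Nat := ps.countP (fun s => !vAb s)

def muQ (qs : List (List Int)) (n : Nat) (ps : List (List Int)) : Nat :=
  ps.length * ((n + 2) ^ 2) ^ 2 + badC ps * (n + 2) ^ 2 + sumPhi qs n 0 ps

theorem phiQ_le {qs n i} (h : i ≤ n) : phiQ qs n i ≤ n := by
  unfold phiQ; split <;> omega

theorem sumPhi_append (qs : List (List Int)) (n : Nat) :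
    ∀ (xs ys : List (List Int)) (off : Nat),
    sumPhi qs n off (xs ++ ys) = sumPhi qs n off xs + sumPhi qs n (off + xs.flatten.length) ys := by
  intro xs
  induction xs with
  | nil => intro ys off; simp [sumPhi]
  | cons s xs ih =>
    intro ys off
    simp only [List.cons_append, sumPhi, ih, List.flatten_cons, List.length_append]
    rw [show off + (s.length + xs.flatten.length) = off + s.length + xs.flatten.length by omega]
    omega

theorem sumPhi_le (qs : List (List Int)) (n : Nat) :
    ∀ (ps : List (List Int)) (off : Nat), off + ps.flatten.length ≤ n →
    sumPhi qs n off ps ≤ ps.length * n := by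
  intro ps
  induction ps with
  | nil => intro off _; simp [sumPhi]
  | cons s ps ih =>
    intro off hoff
    simp only [List.flatten_cons, List.length_append] at hoff
    have h1 : (if vAb s then 0 else phiQ qs n off) ≤ n := by
      split
      · omega
      · exact phiQ_le (by omega)
    have h2 := ih (off + s.length) (by omega)
    simp only [sumPhi, List.length_cons]
    calc (if vAb s then 0 else phiQ qs n off) + sumPhi qs n (off + s.length) ps
        ≤ n + ps.length * n := by omega
      _ = (ps.length + 1) * n := by ring

theorem blocks_le_length {ps : List (List Int)} {l : List Int} (h : PartOf vB ps l) :
    ps.length ≤ l.length := by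
  rw [← h.1]
  have : ∀ ps : List (List Int), (∀ s ∈ ps, s ≠ []) → ps.length ≤ ps.flatten.length := by
    intro ps
    induction ps with
    | nil => simp
    | cons s ps ih =>
      intro hne
      have hs := hne s (by simp)
      have h1 : 1 ≤ s.length := List.length_pos_iff.2 hs
      have := ih (fun t ht => hne t (by simp [ht]))
      simp only [List.flatten_cons, List.length_append, List.length_cons]
      omega
  exact this ps (fun s hs => vB_ne_nil (h.2 s hs))

theorem badC_le (ps : List (List Int)) : badC ps ≤ ps.length := List.countP_le_length

-- lexicographic dominance for μ
theorem muQ_lt {qs : List (List Int)} {l : List Int} {ps ps' : List (List Int)}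
    (hps : PartOf vB ps l) (hps' : PartOf vB ps' l)
    (h : ps'.length < ps.length ∨
      (ps'.length = ps.length ∧ (badC ps' < badC ps ∨
        (badC ps' = badC ps ∧ sumPhi qs l.length 0 ps' < sumPhi qs l.length 0 ps)))) :
    muQ qs l.length ps' < muQ qs l.length ps := by
  set n := l.length with hn
  have hflat' : ps'.flatten.length = n := by rw [hps'.1]
  have hflat : ps.flatten.length = n := by rw [hps.1]
  have hb' : badC ps' ≤ n := le_trans (badC_le ps') (blocks_le_length hps')
  have hlen' : ps'.length ≤ n := blocks_le_length hps'
  have hs' : sumPhi qs n 0 ps' ≤ n * n := by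
    have := sumPhi_le qs n ps' 0 (by omega)
    calc sumPhi qs n 0 ps' ≤ ps'.length * n := this
      _ ≤ n * n := Nat.mul_le_mul_right n hlen'
  have hs : sumPhi qs n 0 ps ≤ n * n := by
    have := sumPhi_le qs n ps 0 (by omega)
    have hlen : ps.length ≤ n := blocks_le_length hps
    calc sumPhi qs n 0 ps ≤ ps.length * n := this
      _ ≤ n * n := Nat.mul_le_mul_right n hlen
  have hb : badC ps ≤ n := le_trans (badC_le ps) (blocks_le_length hps)
  unfold muQ
  rcases h with h | ⟨heq, h⟩
  · -- fewer blocks wins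
    have key : badC ps' * (n + 2) ^ 2 + sumPhi qs n 0 ps' < ((n + 2) ^ 2) ^ 2 := by nlinarith
    nlinarith
  · rw [heq]
    rcases h with h | ⟨hbeq, h⟩
    · have key : sumPhi qs n 0 ps' < (n + 2) ^ 2 := by nlinarith
      nlinarith
    · rw [hbeq]
      omega

theorem vAb_pair_true {w v : Int} (h : 1 < gA [w, v]) : vAb [w, v] = true := by
  simp [vAb]; exact h

theorem vAb_single_false {v : Int} (h : v ≤ -2) : vAb [v] = false := by
  simp [vAb]; omega

theorem vAb_concat_true {G₁ : List Int} {w : Int} (hne : G₁ ≠ []) (h : 1 < gA (G₁ ++ [w])) :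
    vAb (G₁ ++ [w]) = true := by
  match G₁, hne with
  | x :: t, _ =>
    rw [vAb_multi (by simp)]
    simpa using h

-- the key exchange lemma: a μ-minimum vB-partition consists of vA blocks only
theorem min_partition_all_vA {qs : List (List Int)} {l : List Int} (hqs : PartOf vA qs l)
    {ps : List (List Int)} (hps : PartOf vB ps l)
    (hmin : ∀ rs, PartOf vB rs l → muQ qs l.length ps ≤ muQ qs l.length rs) :
    ∀ s ∈ ps, vA s := by
  intro s₀ hs₀
  by_contra hbad
  obtain ⟨v, rfl, hv⟩ := bad_shape (hps.2 s₀ hs₀) hbad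
  obtain ⟨pl, pr, rfl⟩ := List.append_of_mem hs₀
  have boom : ∀ rs, PartOf vB rs l → muQ qs l.length rs < muQ qs l.length (pl ++ [v] :: pr) → False :=
    fun rs h hlt => absurd (hmin rs h) (by omega)
  have hl : l = pl.flatten ++ v :: pr.flatten := by rw [← hps.1]; simp
  have hn : l.length = pl.flatten.length + 1 + pr.flatten.length := by rw [hl]; simp [List.append_assoc]; omega
  have hiv : l.getD pl.flatten.length 0 = v := by
    rw [hl, List.getD_append_right _ _ _ _ le_rfl]
    simp
  have hvbad : vAb [v] = false := vAb_single_false hv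
  by_cases hL : 0 < pl.flatten.length ∧ linkedB qs (pl.flatten.length - 1) = true
  · -- steal the element to the LEFT of v from the previous block
    obtain ⟨hi0, hlink⟩ := hL
    obtain ⟨pl', G, rfl⟩ : ∃ pl' G, pl = pl' ++ [G] := by
      rcases List.eq_nil_or_concat pl with rfl | ⟨pl', G, rfl⟩
      · simp at hi0
      · exact ⟨pl', G, by rw [List.concat_eq_append]⟩
    have hG : vB G := hps.2 G (by simp)
    obtain ⟨G₁, w, rfl⟩ : ∃ G₁ w, G = G₁ ++ [w] := by
      rcases List.eq_nil_or_concat G with rfl | ⟨G₁, w, rfl⟩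
      · exact absurd rfl (vB_ne_nil hG)
      · exact ⟨G₁, w, by rw [List.concat_eq_append]⟩
    have hioff : (pl' ++ [G₁ ++ [w]]).flatten.length = pl'.flatten.length + G₁.length + 1 := by
      simp only [List.length_flatten, List.flatten_append, List.flatten_cons, List.flatten_nil, List.map_append, List.sum_append, List.map_cons, List.sum_cons, List.map_nil, List.sum_nil, List.length_append, List.length_cons, List.length_nil, List.append_nil]; omega
    have hl2 : l = (pl'.flatten ++ G₁) ++ w :: v :: pr.flatten := by
      rw [hl]; simp
    have hoff1 : (pl'.flatten ++ G₁).length = pl'.flatten.length + G₁.length := by simp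
    have hslice2 : (l.drop (pl'.flatten.length + G₁.length)).take 2 = [w, v] := by
      rw [hl2, ← hoff1, List.drop_left]
      rfl
    have hpair : 1 < gA [w, v] := by
      have hr := run_in_block qs l hqs (pl'.flatten.length + G₁.length) 1
        (by
          intro j h1 h2
          rw [show j = pl'.flatten.length + G₁.length by omega]
          rw [hioff] at hlink
          rw [show pl'.flatten.length + G₁.length + 1 - 1
              = pl'.flatten.length + G₁.length by omega] at hlink
          exact hlink)
        (by rw [hn, hioff]; simp only [List.length_flatten, List.flatten_append, List.flatten_cons, List.flatten_nil, List.map_append, List.sum_append, List.map_cons, List.sum_cons, List.map_nil, List.sum_nil, List.length_append, List.length_cons, List.length_nil, List.append_nil]; omega)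
        (⟨v, by rw [hslice2]; simp, by omega⟩)
      rw [hslice2] at hr
      exact hr
    by_cases hG1 : G₁ = []
    · -- previous block was a single element: merge, one block fewer
      subst hG1
      have hps' : PartOf vB (pl' ++ [w, v] :: pr) l := by
        refine ⟨by rw [hl]; simp [List.append_assoc], ?_⟩
        intro s hs
        rcases List.mem_append.1 hs with hs | hs
        · exact hps.2 s (by simp [hs])
        · rcases List.mem_cons.1 hs with rfl | hs
          · exact hpair
          · exact hps.2 s (by simp [hs])
      exact boom _ hps' (muQ_lt hps hps' (Or.inl (by simp only [List.length_append, List.length_cons, List.length_nil] <;> omega)))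
    · by_cases hG10 : gA G₁ = 0
      · -- prefix of previous block is all zeros: absorb everything, one block fewer
        have hps' : PartOf vB (pl' ++ (G₁ ++ [w, v]) :: pr) l := by
          refine ⟨by rw [hl]; simp [List.append_assoc], ?_⟩
          intro s hs
          rcases List.mem_append.1 hs with hs | hs
          · exact hps.2 s (by simp [hs])
          · rcases List.mem_cons.1 hs with rfl | hs
            · show 1 < gA (G₁ ++ [w, v])
              rw [gA_append, hG10, Nat.gcd_zero_left]
              exact hpair
            · exact hps.2 s (by simp [hs])
        exact boom _ hps' (muQ_lt hps hps' (Or.inl (by simp only [List.length_append, List.length_cons, List.length_nil] <;> omega)))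
      · have hG₁2 : 1 < gA G₁ := by
          have h2 : 1 < gA (G₁ ++ [w]) := hG
          have := Nat.le_of_dvd (Nat.pos_of_ne_zero hG10) (gA_prefix_dvd G₁ [w])
          omega
        have hps' : PartOf vB (pl' ++ G₁ :: [w, v] :: pr) l := by
          refine ⟨by rw [hl]; simp [List.append_assoc], ?_⟩
          intro s hs
          rcases List.mem_append.1 hs with hs | hs
          · exact hps.2 s (by simp [hs])
          · rcases List.mem_cons.1 hs with rfl | hs
            · exact hG₁2
            · rcases List.mem_cons.1 hs with rfl | hs
              · exact hpair
              · exact hps.2 s (by simp [hs])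
        have hGgood : vAb (G₁ ++ [w]) = true := vAb_concat_true hG1 hG
        have hWVgood : vAb [w, v] = true := vAb_pair_true hpair
        by_cases hG1A : vAb G₁ = true
        · -- the stolen-from block stays valid: one bad block fewer
          have hbadlt : badC (pl' ++ G₁ :: [w, v] :: pr) < badC (pl' ++ [G₁ ++ [w]] ++ [v] :: pr) := by
            unfold badC
            simp [List.countP_append, List.countP_cons, hG1A, hGgood, hWVgood, hvbad]
          exact boom _ hps' (muQ_lt hps hps' (Or.inr ⟨by simp only [List.length_append, List.length_cons, List.length_nil] <;> omega, Or.inl hbadlt⟩))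
        · obtain ⟨z, rfl, hz⟩ := bad_shape hG₁2 (by simpa [vA] using hG1A)
          -- previous block was [z, w] with z ≤ -2
          have hzbad : vAb [z] = false := vAb_single_false hz
          have hGgood2 : vAb [z, w] = true := by simpa using hGgood
          have hl3 : l = pl'.flatten ++ z :: w :: v :: pr.flatten := by rw [hl]; simp [List.append_assoc]
          by_cases hcond : 0 < pl'.flatten.length ∧ linkedB qs (pl'.flatten.length - 1) = true
          · -- φ strictly decreases: the bad singleton moves two places left
            have hphilt : sumPhi qs l.length 0 (pl' ++ [z] :: [w, v] :: pr)
                < sumPhi qs l.length 0 (pl' ++ [[z] ++ [w]] ++ [v] :: pr) := by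
              rw [show (pl' ++ [[z] ++ [w]] ++ [v] :: pr) = pl' ++ ([z, w] :: [v] :: pr) by simp]
              rw [sumPhi_append, sumPhi_append]
              simp only [Nat.zero_add]
              have e1 : sumPhi qs l.length pl'.flatten.length ([z, w] :: [v] :: pr)
                  = phiQ qs l.length (pl'.flatten.length + 2)
                    + sumPhi qs l.length (pl'.flatten.length + 2 + 1) pr := by
                simp [sumPhi, hGgood2, hvbad]
              have e2 : sumPhi qs l.length pl'.flatten.length ([z] :: [w, v] :: pr)
                  = phiQ qs l.length pl'.flatten.length
                    + sumPhi qs l.length (pl'.flatten.length + 1 + 2) pr := by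
                simp [sumPhi, hzbad, hWVgood]
              rw [e1, e2, show pl'.flatten.length + 1 + 2 = pl'.flatten.length + 2 + 1 by omega]
              have hphi1 : phiQ qs l.length (pl'.flatten.length + 2) = pl'.flatten.length + 2 := by
                unfold phiQ
                rw [if_pos]
                constructor
                · omega
                · rw [show pl'.flatten.length + 2 - 1 = pl'.flatten.length + 1 by omega]
                  rw [hioff] at hlink
                  rw [show pl'.flatten.length + [z].length + 1 - 1 = pl'.flatten.length + 1 by simp] at hlink
                  exact hlink
              have hphi2 : phiQ qs l.length pl'.flatten.length = pl'.flatten.length - 1 + 1 ∨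
                  phiQ qs l.length pl'.flatten.length = pl'.flatten.length := by
                unfold phiQ
                rw [if_pos hcond]
                right; rfl
              rw [hphi1]
              rcases hphi2 with h | h <;> rw [h] <;> omega
            have hbadeq : badC (pl' ++ [z] :: [w, v] :: pr) = badC (pl' ++ [[z] ++ [w]] ++ [v] :: pr) := by
              unfold badC
              simp [List.countP_append, List.countP_cons, hGgood2, hWVgood, hvbad, hzbad]
            exact boom _ hps' (muQ_lt hps hps'
              (Or.inr ⟨by simp only [List.length_append, List.length_cons, List.length_nil] <;> omega, Or.inr ⟨hbadeq, hphilt⟩⟩))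
          · -- z is linked to w as well: merge all three, one block fewer
            have hzpos : l.getD pl'.flatten.length 0 = z := by
              rw [hl3, List.getD_append_right _ _ _ _ le_rfl]
              simp
            have hzlink : linkedB qs pl'.flatten.length = true := by
              rcases linked_of_le_one qs l hqs pl'.flatten.length
                (by rw [hn, hioff]; simp only [List.length_flatten, List.flatten_append, List.flatten_cons, List.flatten_nil, List.map_append, List.sum_append, List.map_cons, List.sum_cons, List.map_nil, List.sum_nil, List.length_append, List.length_cons, List.length_nil, List.append_nil]; omega) (by rw [hzpos]; omega) with h | h
              · exact h
              · exact absurd h hcond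
            have hslice3 : (l.drop pl'.flatten.length).take 3 = [z, w, v] := by
              rw [hl3, List.drop_left]
              rfl
            have htriple : 1 < gA [z, w, v] := by
              have hr := run_in_block qs l hqs pl'.flatten.length 2
                (by
                  intro j h1 h2
                  rcases (by omega : j = pl'.flatten.length ∨ j = pl'.flatten.length + 1) with rfl | hj
                  · exact hzlink
                  · rw [hj]
                    rw [hioff] at hlink
                    rw [show pl'.flatten.length + [z].length + 1 - 1 = pl'.flatten.length + 1 by simp] at hlink
                    exact hlink)
                (by rw [hn, hioff]; simp only [List.length_flatten, List.flatten_append, List.flatten_cons, List.flatten_nil, List.map_append, List.sum_append, List.map_cons, List.sum_cons, List.map_nil, List.sum_nil, List.length_append, List.length_cons, List.length_nil, List.append_nil]; omega)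
                (⟨v, by rw [hslice3]; simp, by omega⟩)
              rw [hslice3] at hr
              exact hr
            have hps'' : PartOf vB (pl' ++ [z, w, v] :: pr) l := by
              refine ⟨by rw [hl3]; simp [List.append_assoc], ?_⟩
              intro s hs
              rcases List.mem_append.1 hs with hs | hs
              · exact hps.2 s (by simp [hs])
              · rcases List.mem_cons.1 hs with rfl | hs
                · exact htriple
                · exact hps.2 s (by simp [hs])
            exact boom _ hps'' (muQ_lt hps hps'' (Or.inl (by simp only [List.length_append, List.length_cons, List.length_nil] <;> omega)))
  · -- v must be linked to the RIGHT: steal the first element of the next block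
    have hlink : linkedB qs pl.flatten.length = true := by
      rcases linked_of_le_one qs l hqs pl.flatten.length (by omega) (by rw [hiv]; omega) with h | h
      · exact h
      · exact absurd h hL
    have hi1 : pl.flatten.length + 1 < l.length := by
      have := linked_lt hlink
      rwa [hqs.1] at this
    obtain ⟨R, pr', rfl⟩ : ∃ R pr', pr = R :: pr' := by
      cases pr with
      | nil => exfalso; rw [hn] at hi1; simp at hi1
      | cons R pr' => exact ⟨R, pr', rfl⟩
    have hR : vB R := hps.2 R (by simp)
    obtain ⟨w, R₂, rfl⟩ : ∃ w R₂, R = w :: R₂ := by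
      cases R with
      | nil => exact absurd rfl (vB_ne_nil hR)
      | cons w R₂ => exact ⟨w, R₂, rfl⟩
    have hl2 : l = pl.flatten ++ v :: w :: (R₂ ++ pr'.flatten) := by rw [hl]; simp [List.append_assoc]
    have hslice2 : (l.drop pl.flatten.length).take 2 = [v, w] := by
      rw [hl2, List.drop_left]
      rfl
    have hpair : 1 < gA [v, w] := by
      have hr := run_in_block qs l hqs pl.flatten.length 1
        (by intro j h1 h2; rw [show j = pl.flatten.length by omega]; exact hlink)
        (by omega)
        (⟨v, by rw [hslice2]; simp, by omega⟩)
      rw [hslice2] at hr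
      exact hr
    have hVWgood : vAb [v, w] = true := vAb_pair_true hpair
    by_cases hR2 : R₂ = []
    · subst hR2
      have hps' : PartOf vB (pl ++ [v, w] :: pr') l := by
        refine ⟨by rw [hl2]; simp [List.append_assoc], ?_⟩
        intro s hs
        rcases List.mem_append.1 hs with hs | hs
        · exact hps.2 s (by simp [hs])
        · rcases List.mem_cons.1 hs with rfl | hs
          · exact hpair
          · exact hps.2 s (by simp [hs])
      exact boom _ hps' (muQ_lt hps hps' (Or.inl (by simp only [List.length_append, List.length_cons, List.length_nil] <;> omega)))
    · by_cases hR20 : gA R₂ = 0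
      · have hps' : PartOf vB (pl ++ ([v, w] ++ R₂) :: pr') l := by
          refine ⟨by rw [hl2]; simp [List.append_assoc], ?_⟩
          intro s hs
          rcases List.mem_append.1 hs with hs | hs
          · exact hps.2 s (by simp [hs])
          · rcases List.mem_cons.1 hs with rfl | hs
            · show 1 < gA ([v, w] ++ R₂)
              rw [gA_append, hR20, Nat.gcd_zero_right]
              exact hpair
            · exact hps.2 s (by simp [hs])
        exact boom _ hps' (muQ_lt hps hps' (Or.inl (by simp only [List.length_append, List.length_cons, List.length_nil] <;> omega)))
      · have hR₂2 : 1 < gA R₂ := by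
          have h2 : 1 < gA (w :: R₂) := hR
          have hdvd : gA ([w] ++ R₂) ∣ gA R₂ := gA_suffix_dvd [w] R₂
          simp only [List.singleton_append] at hdvd
          have := Nat.le_of_dvd (Nat.pos_of_ne_zero hR20) hdvd
          omega
        have hps' : PartOf vB (pl ++ [v, w] :: R₂ :: pr') l := by
          refine ⟨by rw [hl2]; simp [List.append_assoc], ?_⟩
          intro s hs
          rcases List.mem_append.1 hs with hs | hs
          · exact hps.2 s (by simp [hs])
          · rcases List.mem_cons.1 hs with rfl | hs
            · exact hpair
            · rcases List.mem_cons.1 hs with rfl | hs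
              · exact hR₂2
              · exact hps.2 s (by simp [hs])
        have hRgood : vAb (w :: R₂) = true := by
          have : 2 ≤ (w :: R₂).length := by
            cases R₂ with
            | nil => exact absurd rfl hR2
            | cons a t => simp
          rw [vAb_multi this]
          simpa using hR
        by_cases hR2A : vAb R₂ = true
        · have hbadlt : badC (pl ++ [v, w] :: R₂ :: pr') < badC (pl ++ [v] :: (w :: R₂) :: pr') := by
            unfold badC
            simp [List.countP_append, List.countP_cons, hR2A, hRgood, hVWgood, hvbad]
          exact boom _ hps' (muQ_lt hps hps' (Or.inr ⟨by simp only [List.length_append, List.length_cons, List.length_nil] <;> omega, Or.inl hbadlt⟩))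
        · obtain ⟨z, rfl, hz⟩ := bad_shape hR₂2 (by simpa [vA] using hR2A)
          have hzbad : vAb [z] = false := vAb_single_false hz
          by_cases hlink1 : linkedB qs (pl.flatten.length + 1) = true
          · -- v, w, z all in one qs-block: merge, one block fewer
            have hslice3 : (l.drop pl.flatten.length).take 3 = [v, w, z] := by
              rw [hl2, List.drop_left]
              rfl
            have htriple : 1 < gA [v, w, z] := by
              have hr := run_in_block qs l hqs pl.flatten.length 2
                (by
                  intro j h1 h2
                  rcases (by omega : j = pl.flatten.length ∨ j = pl.flatten.length + 1) with rfl | hj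
                  · exact hlink
                  · rw [hj]; exact hlink1)
                (by rw [hn]; simp only [List.length_flatten, List.flatten_append, List.flatten_cons, List.flatten_nil, List.map_append, List.sum_append, List.map_cons, List.sum_cons, List.map_nil, List.sum_nil, List.length_append, List.length_cons, List.length_nil, List.append_nil]; omega)
                (⟨v, by rw [hslice3]; simp, by omega⟩)
              rw [hslice3] at hr
              exact hr
            have hps'' : PartOf vB (pl ++ [v, w, z] :: pr') l := by
              refine ⟨by rw [hl2]; simp [List.append_assoc], ?_⟩
              intro s hs
              rcases List.mem_append.1 hs with hs | hs
              · exact hps.2 s (by simp [hs])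
              · rcases List.mem_cons.1 hs with rfl | hs
                · exact htriple
                · exact hps.2 s (by simp [hs])
            exact boom _ hps'' (muQ_lt hps hps'' (Or.inl (by simp only [List.length_append, List.length_cons, List.length_nil] <;> omega)))
          · -- φ strictly decreases: the bad singleton moves two places right
            have hphilt : sumPhi qs l.length 0 (pl ++ [v, w] :: [z] :: pr')
                < sumPhi qs l.length 0 (pl ++ [v] :: (w :: [z]) :: pr') := by
              rw [sumPhi_append, sumPhi_append]
              simp only [Nat.zero_add]
              have e1 : sumPhi qs l.length pl.flatten.length ([v] :: (w :: [z]) :: pr')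
                  = phiQ qs l.length pl.flatten.length
                    + sumPhi qs l.length (pl.flatten.length + 1 + 2) pr' := by
                simp [sumPhi, hRgood, hvbad]
              have e2 : sumPhi qs l.length pl.flatten.length ([v, w] :: [z] :: pr')
                  = phiQ qs l.length (pl.flatten.length + 2)
                    + sumPhi qs l.length (pl.flatten.length + 2 + 1) pr' := by
                simp [sumPhi, hzbad, hVWgood]
              rw [e1, e2, show pl.flatten.length + 1 + 2 = pl.flatten.length + 2 + 1 by omega]
              have hphi1 : phiQ qs l.length pl.flatten.length = l.length - pl.flatten.length := by
                unfold phiQ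
                rw [if_neg]
                intro h
                exact hL ⟨h.1, h.2⟩
              have hphi2 : phiQ qs l.length (pl.flatten.length + 2)
                  = l.length - (pl.flatten.length + 2) := by
                unfold phiQ
                rw [if_neg]
                intro h
                rw [show pl.flatten.length + 2 - 1 = pl.flatten.length + 1 by omega] at h
                exact hlink1 h.2
              rw [hphi1, hphi2]
              have hn3 : pl.flatten.length + 3 ≤ l.length := by rw [hn]; simp only [List.length_flatten, List.flatten_append, List.flatten_cons, List.flatten_nil, List.map_append, List.sum_append, List.map_cons, List.sum_cons, List.map_nil, List.sum_nil, List.length_append, List.length_cons, List.length_nil, List.append_nil]; omega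
              omega
            have hbadeq : badC (pl ++ [v, w] :: [z] :: pr') = badC (pl ++ [v] :: (w :: [z]) :: pr') := by
              unfold badC
              simp [List.countP_append, List.countP_cons, hRgood, hVWgood, hvbad, hzbad]
            exact boom _ hps' (muQ_lt hps hps' (Or.inr ⟨by simp only [List.length_append, List.length_cons, List.length_nil] <;> omega, Or.inr ⟨hbadeq, hphilt⟩⟩))

/- ---------- putting everything together ---------- -/

-- a vA-partition of minimum size among all vB-partitions exists (the exchange argument)
theorem exists_vA_min {l : List Int} {qs : List (List Int)} (hqs : PartOf vA qs l) :
    ∃ as, PartOf vA as l ∧ ∀ rs, PartOf vB rs l → as.length ≤ rs.length := by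
  have hne : {m | ∃ ps, PartOf vB ps l ∧ muQ qs l.length ps = m}.Nonempty :=
    ⟨muQ qs l.length qs, qs, PartOf_weaken hqs, rfl⟩
  obtain ⟨ps, hps, hmu⟩ := Nat.sInf_mem hne
  have hmin : ∀ rs, PartOf vB rs l → muQ qs l.length ps ≤ muQ qs l.length rs := by
    intro rs h
    rw [hmu]
    exact Nat.sInf_le ⟨rs, h, rfl⟩
  refine ⟨ps, ⟨hps.1, min_partition_all_vA hqs hps hmin⟩, ?_⟩
  intro rs hrs
  by_contra hlt
  exact absurd (hmin rs hrs) (Nat.not_le.2 (muQ_lt hps hrs (Or.inl (by omega))))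

theorem canSplitF_iff : ∀ (f : Nat) (l : List Int), l.length ≤ f →
    (canSplitF f l = true ↔ ∃ ps, PartOf vA ps l) := by
  intro f
  induction f with
  | zero =>
    intro l hf
    have : l = [] := List.length_eq_zero_iff.1 (by omega)
    subst this
    simp [canSplitF]
    exact ⟨[], ⟨rfl, by simp⟩⟩
  | succ f ih =>
    intro l hf
    constructor
    · intro h
      unfold canSplitF at h
      rcases Bool.or_eq_true_iff.1 h with h | h
      · exact ⟨[], ⟨by simpa using (List.isEmpty_iff.1 h).symm, by simp⟩⟩
      · rcases List.any_eq_true.1 h with ⟨p, hp, hpp⟩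
        rcases Bool.and_eq_true_iff.1 hpp with ⟨hval, hrec⟩
        have hlen : (l.drop (p + 1)).length ≤ f := by
          rw [List.length_drop]
          have := List.mem_range.1 hp
          omega
        rcases (ih _ hlen).1 hrec with ⟨ps', hps'⟩
        refine ⟨l.take (p + 1) :: ps', ⟨?_, ?_⟩⟩
        · simp [hps'.1]
        · intro s hs
          rcases List.mem_cons.1 hs with rfl | hs
          · exact hval
          · exact hps'.2 s hs
    · intro ⟨ps, hflat, hv⟩
      unfold canSplitF
      cases ps with
      | nil =>
        have : l = [] := by simpa using hflat.symm
        simp [this]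
      | cons q ps' =>
        have hq : vA q := hv q (by simp)
        have hqne : q ≠ [] := vA_ne_nil hq
        have hq1 : 1 ≤ q.length := List.length_pos_iff.2 hqne
        have hlq : l = q ++ ps'.flatten := by rw [← hflat]; simp
        have hlen : l.length = q.length + ps'.flatten.length := by rw [hlq]; simp
        refine Bool.or_eq_true_iff.2 (Or.inr (List.any_eq_true.2 ⟨q.length - 1, ?_, ?_⟩))
        · exact List.mem_range.2 (by omega)
        · refine Bool.and_eq_true_iff.2 ⟨?_, ?_⟩
          · rw [show q.length - 1 + 1 = q.length by omega, hlq, List.take_left]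
            exact hq
          · rw [show q.length - 1 + 1 = q.length by omega, hlq, List.drop_left]
            exact (ih ps'.flatten (by omega)).2 ⟨ps', rfl, fun s hs => hv s (by simp [hs])⟩

theorem goB_of_one_mem : ∀ (xs : List Int) (count g : Int), (1 : Int) ∈ xs →
    goB xs count g = -1 := by
  intro xs
  induction xs with
  | nil => intro _ _ h; cases h
  | cons x rest ih =>
    intro count g hmem
    by_cases hx : x = 1
    · subst hx
      have hg : (Int.gcd g 1 : Int) = 1 := by simp [Int.gcd]
      simp only [goB, hg]
      by_cases hle : g ≤ 1
      · simp [hle]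
      · simp [hle]
    · have hmem' : (1 : Int) ∈ rest := by
        rcases List.mem_cons.1 hmem with h | h
        · exact absurd h.symm hx
        · exact h
      show (if (Int.gcd g x : Int) = 1 then
          if g ≤ 1 then -1
          else if (x.natAbs : Int) = 1 then -1
          else goB rest (count + 1) (x.natAbs : Int)
        else goB rest count (Int.gcd g x : Int)) = -1
      split
      · split
        · rfl
        · split
          · rfl
          · exact ih _ _ hmem'
      · exact ih _ _ hmem'

-- ===== VERDICT (by name: the statement is the Claim_ definition above) =====
theorem minSplitIntoSubarraysWithGCDGreaterThanOne_spec : Claim_equal_minSplitIntoSubarraysWithGCDGreaterThanOne := by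
  intro nums _ hpre
  unfold Spec_minSplitIntoSubarraysWithGCDGreaterThanOne
  by_cases h1 : (1 : Int) ∈ nums
  · -- Python A returns -1 immediately; the greedy also fails at the 1
    have hne : nums ≠ [] := by rintro rfl; cases h1
    have hA : minSplitIntoSubarraysWithGCDGreaterThanOne nums = -1 := by
      unfold minSplitIntoSubarraysWithGCDGreaterThanOne
      rw [if_pos h1]
    have hB : minSplitIntoSubarraysWithGCDGreaterThanOne_alt nums = -1 := by
      unfold minSplitIntoSubarraysWithGCDGreaterThanOne_alt
      rw [if_neg hne]
      exact goB_of_one_mem nums 0 0 h1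
    rw [hA, hB]
  · rcases hpre with h1' | hsplit
    · exact absurd h1' h1
    obtain ⟨qs, hqs⟩ := (canSplitF_iff nums.length nums le_rfl).1 hsplit
    by_cases hnil : nums = []
    · subst hnil
      decide
    · have hn1 : 1 ≤ nums.length := List.length_pos_iff.2 hnil
      have hspec := entry_spec nums nums.length le_rfl
      rw [List.take_length] at hspec
      obtain ⟨m₀, _, hent⟩ := hspec.2 qs.length ⟨qs, hqs, rfl⟩
      have hPAm₀ : PA nums m₀ := hspec.1 m₀ hent
      have hA : minSplitIntoSubarraysWithGCDGreaterThanOne nums = (m₀ : Int) := by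
        unfold minSplitIntoSubarraysWithGCDGreaterThanOne
        rw [if_neg h1, if_neg (by omega : ¬ nums.length = 0)]
        rw [show (dpA nums nums.length).getD nums.length none = entryA nums nums.length from rfl]
        rw [hent]
      obtain ⟨r1, rs', rfl⟩ : ∃ r1 rs', qs = r1 :: rs' := by
        cases qs with
        | nil =>
          exfalso
          exact hnil (by simpa using hqs.1.symm)
        | cons a b => exact ⟨a, b, rfl⟩
      have hqsB := PartOf_weaken hqs
      obtain ⟨ps, hg, _⟩ := greedy_min nums [] r1 rs'
        ⟨by simpa using hqsB.1, hqsB.2⟩ ⟨r1, by simp⟩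
      have hsound := greedyP_sound nums [] ps hg
      have hB : minSplitIntoSubarraysWithGCDGreaterThanOne_alt nums = (ps.length : Int) := by
        unfold minSplitIntoSubarraysWithGCDGreaterThanOne_alt
        rw [if_neg hnil]
        rw [show goB nums 0 0 = goB nums 0 ((gA [] : Nat) : Int) by rw [gA_nil]; rfl]
        rw [goB_greedyP nums 0 []]
        rw [hg]
        simp
      -- the two counts agree
      obtain ⟨as, hasA, hasmin⟩ := exists_vA_min hqs
      obtain ⟨m₁, hm₁le, hent₁⟩ := hspec.2 as.length ⟨as, hasA, rfl⟩
      have hm₁m₀ : m₁ = m₀ := by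
        rw [hent] at hent₁
        exact Option.some_inj.1 hent₁.symm
      have hup : m₀ ≤ as.length := by omega
      have hps_part : PartOf vB ps nums := ⟨by simpa using hsound.1, hsound.2⟩
      have h2 : as.length ≤ ps.length := hasmin ps hps_part
      obtain ⟨psA, hpsA, hlenA⟩ := hPAm₀
      have hBpart := PartOf_weaken hpsA
      obtain ⟨rA, rsA, rfl⟩ : ∃ rA rsA, psA = rA :: rsA := by
        cases psA with
        | nil =>
          exfalso
          exact hnil (by simpa using hBpart.1.symm)
        | cons a b => exact ⟨a, b, rfl⟩
      obtain ⟨ps₂, hg₂, hlen₂⟩ := greedy_min nums [] rA rsA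
        ⟨by simpa using hBpart.1, hBpart.2⟩ ⟨rA, by simp⟩
      have hps₂ : ps₂ = ps := by
        rw [hg] at hg₂
        exact (Option.some_inj.1 hg₂).symm
      have hlow : ps.length ≤ m₀ := by
        rw [← hps₂, ← hlenA]
        exact hlen₂
      have : m₀ = ps.length := by omega
      rw [hA, hB, this]
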